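-- pv_equiv track=rewrite | github.com/dered-dev/cursopython | orderLowerUpper.py | orderLowerUpper
-- ===== SOURCE A (Python) =====
-- def orderLowerUpper( stringUser ) :
--
--     lowerString = ""
--     upperString = ""
--
--     for letter in stringUser :
--         if letter.islower() :
--             lowerString += letter
--         else :
--             upperString += letter
--
--     return lowerString + upperString
-- ===== SOURCE B (Python) =====
-- def orderLowerUpper(stringUser):
--     return "".join(sorted(stringUser, key=lambda c: not c.islower()))
-- ===== Notes on version B (the rewrite author's own statement) =====
-- stated objective: idiomatic
-- what changed: Replaces the two-accumulator partition loop with a single stable sort keyed on whether each character is non-lowercase, joined into a string.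
import Mathlib
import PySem

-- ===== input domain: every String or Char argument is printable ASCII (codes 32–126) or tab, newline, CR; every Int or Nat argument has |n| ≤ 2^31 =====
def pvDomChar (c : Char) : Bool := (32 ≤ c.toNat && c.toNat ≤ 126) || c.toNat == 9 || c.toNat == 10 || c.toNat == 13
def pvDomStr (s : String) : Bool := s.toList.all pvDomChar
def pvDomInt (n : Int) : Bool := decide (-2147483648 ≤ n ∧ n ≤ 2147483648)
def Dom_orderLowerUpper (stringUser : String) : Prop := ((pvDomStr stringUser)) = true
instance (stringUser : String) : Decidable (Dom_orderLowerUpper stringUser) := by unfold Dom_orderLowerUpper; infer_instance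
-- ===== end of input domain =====

-- B replaces A's two-accumulator partition loop with one stable sort keyed on "not islower" (idiomatic; same result, not claimed faster).


-- ===== PORT A =====
-- for letter in stringUser: append to lowerString or upperString; return lowerString + upperString
def orderLowerUpper (stringUser : String) : String :=
  let r := stringUser.toList.foldl
    (fun (acc : List Char × List Char) letter =>
      if PySem.Chars.islower letter then (acc.1 ++ [letter], acc.2)
      else (acc.1, acc.2 ++ [letter]))
    ([], [])
  String.mk (r.1 ++ r.2)

-- ===== PORT B =====
-- "".join(sorted(stringUser, key=lambda c: not c.islower()))
def orderLowerUpper_alt (stringUser : String) : String :=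
  String.mk (PySem.List.sorted stringUser.toList (fun c => !PySem.Chars.islower c) false)

-- ===== PRECONDITION & SPEC =====
def Spec_orderLowerUpper (stringUser : String) (out : String) : Prop := out = orderLowerUpper_alt stringUser
instance (stringUser : String) (out : String) : Decidable (Spec_orderLowerUpper stringUser out) := by unfold Spec_orderLowerUpper; infer_instance

-- ===== CLAIM (what is proved, stated in full; the proofs are below) =====
def Claim_equal_orderLowerUpper : Prop := ∀ (stringUser : String), Dom_orderLowerUpper stringUser → Spec_orderLowerUpper stringUser (orderLowerUpper stringUser)

-- ===== LEMMAS AND PROOFS =====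

-- Inserting a lowercase char into L ++ U (L all lowercase, U all non-lowercase) lands between L and U.
lemma insertBy_lower (x : Char) (hx : PySem.Chars.islower x = true) :
    ∀ (L U : List Char), (∀ c ∈ L, PySem.Chars.islower c = true) →
      (∀ c ∈ U, PySem.Chars.islower c = false) →
      PySem.List.insertBy
        (fun a b => decide ((!PySem.Chars.islower a) < (!PySem.Chars.islower b))) x (L ++ U)
      = L ++ x :: U := by
  intro L U hL hU
  induction L with
  | nil =>
    cases U with
    | nil => simp [PySem.List.insertBy]
    | cons u us =>
      have hu : PySem.Chars.islower u = false := hU u (by simp)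
      simp [PySem.List.insertBy, hx, hu]
  | cons l ls ih =>
    have hl : PySem.Chars.islower l = true := hL l (by simp)
    have := ih (fun c hc => hL c (by simp [hc]))
    simp [PySem.List.insertBy, hx, hl] at this ⊢
    exact this

-- Inserting a non-lowercase char appends at the end (it is never strictly "before" anything).
lemma insertBy_nonlower (x : Char) (hx : PySem.Chars.islower x = false) :
    ∀ (A : List Char),
      PySem.List.insertBy
        (fun a b => decide ((!PySem.Chars.islower a) < (!PySem.Chars.islower b))) x A
      = A ++ [x] := by
  intro A
  induction A with
  | nil => simp [PySem.List.insertBy]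
  | cons a as ih =>
    have : ((!PySem.Chars.islower x) < (!PySem.Chars.islower a)) = False := by
      simp [hx, Bool.lt_iff]
    simp [PySem.List.insertBy, this, ih]

-- Loop invariant: A's folded pair (L, U) concatenated equals B's insertion-sort fold started from L ++ U.
lemma loop_invariant :
    ∀ (cs : List Char) (L U : List Char),
      (∀ c ∈ L, PySem.Chars.islower c = true) →
      (∀ c ∈ U, PySem.Chars.islower c = false) →
      (let r := cs.foldl
        (fun (acc : List Char × List Char) letter =>
          if PySem.Chars.islower letter then (acc.1 ++ [letter], acc.2)
          else (acc.1, acc.2 ++ [letter])) (L, U)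
       r.1 ++ r.2)
      = cs.foldl
          (fun acc x => PySem.List.insertBy
            (fun a b => decide ((!PySem.Chars.islower a) < (!PySem.Chars.islower b))) x acc)
          (L ++ U) := by
  intro cs
  induction cs with
  | nil => intro L U _ _; simp
  | cons c cs ih =>
    intro L U hL hU
    by_cases hc : PySem.Chars.islower c = true
    · have h1 := insertBy_lower c hc L U hL hU
      have h2 := ih (L ++ [c]) U
        (by intro d hd; rcases List.mem_append.mp hd with h | h
            · exact hL d h
            · simpa [List.mem_singleton.mp h] using hc) hU
      simp only [List.foldl_cons, hc, h1]
      simpa using h2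
    · have hc' : PySem.Chars.islower c = false := by simpa using hc
      have h1 := insertBy_nonlower c hc' (L ++ U)
      have h2 := ih L (U ++ [c]) hL
        (by intro d hd; rcases List.mem_append.mp hd with h | h
            · exact hU d h
            · simpa [List.mem_singleton.mp h] using hc')
      simp only [List.foldl_cons, hc', Bool.false_eq_true, if_false, h1]
      simpa using h2

-- ===== VERDICT (by name: the statement is the Claim_ definition above) =====
theorem orderLowerUpper_spec : Claim_equal_orderLowerUpper := by
  intro s _
  show _ = _
  unfold orderLowerUpper orderLowerUpper_alt
  rw [PySem.List.sorted_eq_foldl_insertBy]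
  have := loop_invariant s.toList [] [] (by simp) (by simp)
  simp only [List.nil_append] at this
  exact congrArg String.mk this
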